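-- pv_equiv track=rewrite | github.com/ethangalebach/adventofcode2022 | src/day03.py | get_badge
-- ===== SOURCE A (Python) =====
-- def get_badge(elf_group: list) -> str:
--     badge_options = set(elf_group[0])
--     for rucksack in elf_group[1:]:
--         badge_options = badge_options & set(rucksack)
--     if len(badge_options) == 1:
--         return badge_options.pop()
--     else:
--         raise Exception(f'more or less than one badge option: {badge_options}')
-- ===== SOURCE B (Python) =====
-- def get_badge(elf_group: list) -> str:
--     badge_options = {c for c in elf_group[0]
--                      if all(c in rucksack for rucksack in elf_group[1:])}
--     if len(badge_options) == 1:
--         return badge_options.pop()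
--     else:
--         raise Exception(f'more or less than one badge option: {badge_options}')
-- ===== Notes on version B (the rewrite author's own statement) =====
-- stated objective: simpler
-- what changed: B tests each candidate character of the first rucksack for membership in all the remaining strings with a single set comprehension, instead of folding successive set-intersection steps through a mutable accumulator.
import Mathlib
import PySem

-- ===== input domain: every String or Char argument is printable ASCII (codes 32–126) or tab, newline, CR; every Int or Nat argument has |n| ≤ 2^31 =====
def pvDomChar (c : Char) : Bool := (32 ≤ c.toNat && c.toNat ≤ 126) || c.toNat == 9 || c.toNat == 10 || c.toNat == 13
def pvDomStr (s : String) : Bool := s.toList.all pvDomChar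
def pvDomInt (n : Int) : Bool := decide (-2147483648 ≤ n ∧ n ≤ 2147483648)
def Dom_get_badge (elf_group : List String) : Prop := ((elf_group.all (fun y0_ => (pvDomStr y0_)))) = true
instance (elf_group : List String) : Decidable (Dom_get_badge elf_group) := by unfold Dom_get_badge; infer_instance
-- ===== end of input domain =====

-- B replaces A's fold of successive set intersections by a single membership-filtered
-- set comprehension over the first rucksack's characters (objective: simpler).


-- ===== PORT A =====
-- badge_options = set(elf_group[0]); for rucksack in elf_group[1:]: badge_options &= set(rucksack)
-- the 'raise' branch (len != 1) is outside Pre_; the port returns "" there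
def get_badge (elf_group : List String) : String :=
  let badge_options : PySem.Set Char :=
    PySem.Set.ofList (PySem.List.pyGetD elf_group 0 "").toList
  let badge_options :=
    (PySem.List.slice elf_group (some 1) none).foldl
      (fun acc rucksack => PySem.Set.inter acc (PySem.Set.ofList rucksack.toList))
      badge_options
  if badge_options.length = 1 then String.mk badge_options else ""

-- ===== PORT B =====
-- badge_options = {c for c in elf_group[0] if all(c in r for r in elf_group[1:])}
def get_badge_alt (elf_group : List String) : String :=
  let rest := PySem.List.slice elf_group (some 1) none
  let badge_options : PySem.Set Char :=
    PySem.Set.ofList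
      ((PySem.List.pyGetD elf_group 0 "").toList.filter
        (fun c => rest.all (fun r => r.toList.contains c)))
  if badge_options.length = 1 then String.mk badge_options else ""

-- ===== PRECONDITION & SPEC =====
-- Pre_ excludes exactly the inputs where Python A raises: the empty list (IndexError on
-- elf_group[0]) and groups whose common-character set does not have exactly one element
-- (the explicit 'raise Exception').
def Pre_get_badge (elf_group : List String) : Prop :=
  elf_group ≠ [] ∧
  ((PySem.List.dedup elf_group.headI.toList).filter
      (fun c => elf_group.tail.all (fun r => r.toList.contains c))).length = 1
instance (elf_group : List String) : Decidable (Pre_get_badge elf_group) := by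
  unfold Pre_get_badge; infer_instance

def pvWitness_get_badge : List String := ["ab", "bc"]

def Spec_get_badge (elf_group : List String) (out : String) : Prop := out = get_badge_alt elf_group
instance (elf_group : List String) (out : String) : Decidable (Spec_get_badge elf_group out) := by unfold Spec_get_badge; infer_instance

-- ===== CLAIM (what is proved, stated in full; the proofs are below) =====
def Claim_equal_get_badge : Prop := ∀ (elf_group : List String), Dom_get_badge elf_group → Pre_get_badge elf_group → Spec_get_badge elf_group (get_badge elf_group)

-- ===== LEMMAS AND PROOFS =====

-- set(xs) filtered = set(xs filtered): first-occurrence dedup commutes with filter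
lemma ofList_filter {α : Type} [BEq α] [LawfulBEq α] (p : α → Bool) (s : List α) :
    (PySem.Set.ofList s).filter p = PySem.Set.ofList (s.filter p) := by
  induction s with
  | nil => rfl
  | cons x xs ih =>
    by_cases hx : p x = true
    · simp [PySem.Set.ofList_cons, PySem.Set.discard, List.filter_filter, hx, ← ih,
        Bool.and_comm]
    · have hd : (PySem.Set.discard (PySem.Set.ofList xs) x).filter p
          = (PySem.Set.ofList xs).filter p := by
        simp only [PySem.Set.discard, List.filter_filter]
        apply List.filter_congr
        intro a _
        by_cases hax : a = x
        · subst hax; simp [hx]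
        · simp [hax]
      simp [PySem.Set.ofList_cons, hx, hd, ih]

lemma contains_ofList {α : Type} [BEq α] [LawfulBEq α] (l : List α) (x : α) :
    (PySem.Set.ofList l).contains x = l.contains x := by
  simp [PySem.Set.contains_eq_listContains, PySem.Set.mem_ofList]

-- A's intersection fold equals B's one-pass membership filter
lemma foldl_inter_eq (rest : List String) (s : List Char) :
    rest.foldl
      (fun acc rucksack => PySem.Set.inter acc (PySem.Set.ofList rucksack.toList))
      (PySem.Set.ofList s)
    = PySem.Set.ofList
        (s.filter (fun c => rest.all (fun r => r.toList.contains c))) := by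
  induction rest generalizing s with
  | nil => simp
  | cons r rs ih =>
    have h1 : PySem.Set.inter (PySem.Set.ofList s) (PySem.Set.ofList r.toList)
        = PySem.Set.ofList (s.filter (fun c => r.toList.contains c)) := by
      show (PySem.Set.ofList s).filter _ = _
      rw [ofList_filter]
      congr 1
      apply List.filter_congr
      intro a _
      exact contains_ofList r.toList a
    simp only [List.foldl_cons, h1, ih, List.filter_filter]
    congr 1
    apply List.filter_congr
    intro a _
    simp [Bool.and_comm]

theorem get_badge_spec_aux (elf_group : List String) :
    get_badge elf_group = get_badge_alt elf_group := by
  cases elf_group with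
  | nil => rfl
  | cons s rest =>
    simp only [get_badge, get_badge_alt, PySem.List.pyGetD_zero_cons,
      PySem.List.slice_from_one, List.tail_cons, foldl_inter_eq]

-- ===== VERDICT (by name: the statement is the Claim_ definition above) =====
theorem get_badge_spec : Claim_equal_get_badge := by
  intro elf_group _ _
  exact get_badge_spec_aux elf_group
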